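-- pv_equiv track=rewrite | github.com/TejaSree023/Operator-precedence | analyzer.py | _guess_precedence_order
-- ===== SOURCE A (Python) =====
-- from typing import Dict, List, Optional, Set, Tuple
--
-- def _guess_precedence_order(operators: Set[str]) -> List[List[str]]:
--     canonical = [
--         ["||"],
--         ["&&"],
--         ["==", "!="],
--         ["<", ">", "<=", ">="],
--         ["+", "-"],
--         ["*", "/", "%"],
--         ["^"],
--     ]
--     remaining = set(operators)
--     ordered = []
--     for group in canonical:
--         present = [op for op in group if op in remaining]
--         if present:
--             ordered.append(present)
--             remaining -= set(present)
--     if remaining: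
--         ordered.append(sorted(remaining))
--     return ordered
-- ===== SOURCE B (Python) =====
-- _ORDER = {"||": 0, "&&": 1, "==": 2, "!=": 3, "<": 4, ">": 5, "<=": 6, ">=": 7,
--           "+": 8, "-": 9, "*": 10, "/": 11, "%": 12, "^": 13}
-- _RANK = {"||": 0, "&&": 1, "==": 2, "!=": 2, "<": 3, ">": 3, "<=": 3, ">=": 3,
--          "+": 4, "-": 4, "*": 5, "/": 5, "%": 5, "^": 6}
--
--
-- def _guess_precedence_order(operators):
--     # sort the known operators once by their canonical position, then group
--     # maximal runs of equal precedence rank in a single scan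
--     ops = set(operators)
--     known = sorted((op for op in ops if op in _ORDER), key=lambda op: _ORDER[op])
--     ordered = []
--     last_rank = None
--     for op in known:
--         r = _RANK[op]
--         if r == last_rank:
--             ordered[-1].append(op)
--         else:
--             ordered.append([op])
--             last_rank = r
--     unknown = sorted(op for op in ops if op not in _ORDER)
--     if unknown:
--         ordered.append(unknown)
--     return ordered
-- ===== Notes on version B (the rewrite author's own statement) =====
-- stated objective: alternative
-- what changed: Instead of A's loop over the canonical tier table filtering a shrinking set, B sorts the distinct known operators once by a precomputed canonical-position key and groups maximal runs of equal precedence rank in a single scan, appending the sorted unknowns at the end.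
import Mathlib
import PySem

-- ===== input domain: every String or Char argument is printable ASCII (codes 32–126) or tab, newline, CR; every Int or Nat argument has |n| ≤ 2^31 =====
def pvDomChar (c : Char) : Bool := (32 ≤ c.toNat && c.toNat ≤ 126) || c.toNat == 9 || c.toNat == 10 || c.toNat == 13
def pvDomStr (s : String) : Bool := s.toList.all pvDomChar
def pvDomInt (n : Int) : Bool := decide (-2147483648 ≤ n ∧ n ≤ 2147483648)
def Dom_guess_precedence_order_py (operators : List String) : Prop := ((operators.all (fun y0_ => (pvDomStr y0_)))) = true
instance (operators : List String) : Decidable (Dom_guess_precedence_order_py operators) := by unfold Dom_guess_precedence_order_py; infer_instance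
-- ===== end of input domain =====

-- B replaces A's loop over the canonical tier table (filtering a shrinking set) by one sort of
-- the distinct known operators by a canonical-position key followed by a single run-grouping
-- scan over equal precedence ranks (objective: alternative).

-- ===== PORT A =====
def canonicalA : List (List String) :=
  [["||"], ["&&"], ["==", "!="], ["<", ">", "<=", ">="], ["+", "-"], ["*", "/", "%"], ["^"]]

def guess_precedence_order_py (operators : List String) : List (List String) :=
  let st := canonicalA.foldl
    (fun (st : List (List String) × PySem.Set String) group =>
      let present := group.filter (fun op => PySem.Set.contains st.2 op)
      if present ≠ [] then (st.1 ++ [present], PySem.Set.diff st.2 (PySem.Set.ofList present))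
      else st)
    ([], PySem.Set.ofList operators)
  if st.2 ≠ [] then st.1 ++ [PySem.List.sorted st.2 (fun x => x) false] else st.1

-- ===== PORT B =====
def orderB : PySem.Dict String Int :=
  PySem.Dict.ofList [("||", 0), ("&&", 1), ("==", 2), ("!=", 3), ("<", 4), (">", 5), ("<=", 6),
    (">=", 7), ("+", 8), ("-", 9), ("*", 10), ("/", 11), ("%", 12), ("^", 13)]
def rankB : PySem.Dict String Int :=
  PySem.Dict.ofList [("||", 0), ("&&", 1), ("==", 2), ("!=", 2), ("<", 3), (">", 3), ("<=", 3),
    (">=", 3), ("+", 4), ("-", 4), ("*", 5), ("/", 5), ("%", 5), ("^", 6)]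

-- loop body: r = _RANK[op] (always present for ops reaching the loop, so getD is exact);
-- 'ordered[-1].append(op)' is dropLast ++ [last ++ [op]] with ordered[-1] = pyGetD · (-1)
def groupStepB (st : List (List String) × Option Int) (op : String) :
    List (List String) × Option Int :=
  let r := rankB.getD op 0
  if st.2 == some r then
    (st.1.dropLast ++ [PySem.List.pyGetD st.1 (-1) [] ++ [op]], st.2)
  else (st.1 ++ [[op]], some r)

def guess_precedence_order_py_alt (operators : List String) : List (List String) :=
  let ops := PySem.Set.ofList operators
  -- sorted(..., key=lambda op: _ORDER[op]): the key is always present (op in _ORDER), getD exact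
  let known := PySem.List.sorted (ops.filter (fun op => orderB.contains op))
    (fun op => orderB.getD op 0) false
  let st := known.foldl groupStepB ([], none)
  let unknown := PySem.List.sorted (ops.filter (fun op => !orderB.contains op)) (fun x => x) false
  if unknown ≠ [] then st.1 ++ [unknown] else st.1

-- ===== PRECONDITION & SPEC =====
def Spec_guess_precedence_order_py (operators : List String) (out : List (List String)) : Prop := out = guess_precedence_order_py_alt operators
instance (operators : List String) (out : List (List String)) : Decidable (Spec_guess_precedence_order_py operators out) := by unfold Spec_guess_precedence_order_py; infer_instance

-- ===== CLAIM (what is proved, stated in full; the proofs are below) =====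
def Claim_equal_guess_precedence_order_py : Prop := ∀ (operators : List String), Dom_guess_precedence_order_py operators → Spec_guess_precedence_order_py operators (guess_precedence_order_py operators)

-- ===== LEMMAS AND PROOFS =====

-- the flattened canonical table, and A's loop body, named for the proofs
def flatCanon : List String :=
  ["||", "&&", "==", "!=", "<", ">", "<=", ">=", "+", "-", "*", "/", "%", "^"]

def stepA : (List (List String) × PySem.Set String) → List String → (List (List String) × PySem.Set String) :=
  fun st group =>
    let present := group.filter (fun op => PySem.Set.contains st.2 op)
    if present ≠ [] then (st.1 ++ [present], PySem.Set.diff st.2 (PySem.Set.ofList present))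
    else st

lemma stepA_snd (acc : List (List String)) (r g : List String) :
    (stepA (acc, r) g).2 = r.filter (fun x => !(g.contains x)) := by
  unfold stepA
  simp only []
  split_ifs with h
  · show PySem.Set.diff _ _ = _
    show r.filter _ = _
    apply List.filter_congr
    intro x hx
    simp [PySem.Set.mem_ofList, hx]
  · push Not at h
    simp only []
    symm
    apply List.filter_eq_self.mpr
    intro x hx
    by_contra hc
    simp at hc
    have hm : x ∈ g.filter (fun op => PySem.Set.contains r op) := by
      simp [hc, hx]
    rw [h] at hm
    simp at hm

lemma stepA_fst (acc : List (List String)) (r g : List String) :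
    (stepA (acc, r) g).1 = acc ++ (if g.filter (fun op => PySem.Set.contains r op) ≠ [] then [g.filter (fun op => PySem.Set.contains r op)] else []) := by
  unfold stepA
  simp only []
  split_ifs with h
  · simp
  · simp

-- pairwise-disjoint groups
lemma foldA_char (gs : List (List String)) (acc : List (List String)) (r : List String)
    (hd : gs.Pairwise (fun g h => ∀ x ∈ g, x ∉ h)) :
    gs.foldl stepA (acc, r) =
      (acc ++ (gs.map (fun g => g.filter (fun op => PySem.Set.contains r op))).filter (fun l => l ≠ []),
       r.filter (fun x => !(gs.flatten.contains x))) := by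
  induction gs generalizing acc r with
  | nil => simp
  | cons g gs ih =>
    rw [List.foldl_cons]
    rw [show gs.foldl stepA (stepA (acc, r) g) = gs.foldl stepA ((stepA (acc, r) g).1, (stepA (acc, r) g).2) by rfl]
    rw [stepA_fst, stepA_snd]
    rw [ih _ _ (List.Pairwise.sublist (List.sublist_cons_self g gs) hd)]
    have hhead : ∀ h ∈ gs, ∀ x ∈ g, x ∉ h := (List.pairwise_cons.mp hd).1
    have hcong : ∀ h ∈ gs,
        h.filter (fun op => PySem.Set.contains (r.filter (fun x => !g.contains x)) op)
          = h.filter (fun op => PySem.Set.contains r op) := by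
      intro h hh
      apply List.filter_congr
      intro op hop
      have hng : op ∉ g := fun hg => hhead h hh op hg hop
      show (r.filter (fun x => !g.contains x)).contains op = r.contains op
      rw [Bool.eq_iff_iff]
      simp [List.mem_filter, hng]
    refine Prod.ext ?_ ?_
    · show _ ++ _ = _
      rw [List.map_congr_left hcong]
      simp only [List.map_cons, List.filter_cons, List.append_assoc]
      by_cases hg : g.filter (fun op => PySem.Set.contains r op) ≠ []
      · rw [if_pos hg, if_pos (by simpa using hg)]
        simp
      · rw [if_neg hg, if_neg (by simpa using hg)]
        simp
    · show List.filter _ (List.filter _ r) = _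
      simp only [List.filter_filter, List.flatten_cons]
      apply List.filter_congr
      intro x _
      simp [Bool.not_or, Bool.and_comm]

-- map snd commutes with the nonempty-filter on snd
lemma mapSnd_filter (l : List (Int × List String)) :
    (l.filter (fun p => p.2 ≠ [])).map (·.2) = (l.map (·.2)).filter (· ≠ []) := by
  induction l with
  | nil => rfl
  | cons a l ih =>
    simp only [ne_eq, decide_not] at ih ⊢
    by_cases h : a.2 = [] <;> simp [h, ih]

-- one maximal run of rank r extends the open last group
lemma runFold (xs : List String) (r : Int) (hr : ∀ op ∈ xs, rankB.getD op 0 = r) :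
    ∀ (os : List (List String)) (g : List String),
    xs.foldl groupStepB (os ++ [g], some r) = (os ++ [g ++ xs], some r) := by
  induction xs with
  | nil => intro os g; simp
  | cons x xs ih =>
    intro os g
    rw [List.foldl_cons]
    have hx : rankB.getD x 0 = r := hr x (by simp)
    have hstep : groupStepB (os ++ [g], some r) x = (os ++ [g ++ [x]], some r) := by
      unfold groupStepB
      simp [hx, PySem.List.pyGetD_neg_one_append_singleton]
    rw [hstep, ih (fun op h => hr op (by simp [h])) os (g ++ [x])]
    simp

-- folding the grouping step over rank-homogeneous blocks with chain-distinct ranks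
lemma blocksFold (bs : List (Int × List String)) :
    (∀ p ∈ bs, p.2 ≠ []) →
    (∀ p ∈ bs, ∀ op ∈ p.2, rankB.getD op 0 = p.1) →
    ∀ (acc : List (List String)) (lr : Option Int),
    (lr :: bs.map (fun p => some p.1)).IsChain (· ≠ ·) →
    (bs.map (·.2)).flatten.foldl groupStepB (acc, lr)
      = (acc ++ bs.map (·.2), (bs.map (fun p => some p.1)).getLastD lr) := by
  induction bs with
  | nil => intro _ _ acc lr _; simp
  | cons p bs ih =>
    intro hne hrk acc lr hch
    obtain ⟨r, l⟩ := p
    obtain ⟨x, xs, rfl⟩ : ∃ x xs, l = x :: xs := by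
      rcases l with _ | ⟨x, xs⟩
      · exact absurd rfl (hne (r, []) (by simp))
      · exact ⟨x, xs, rfl⟩
    have hlr : lr ≠ some r := by
      have := hch
      rw [List.map_cons] at this
      exact (List.isChain_cons_cons.mp this).1
    have hx : rankB.getD x 0 = r := hrk (r, x :: xs) (by simp) x (by simp)
    have hstep : groupStepB (acc, lr) x = (acc ++ [[x]], some r) := by
      unfold groupStepB
      simp [hx, hlr]
    rw [List.map_cons, List.flatten_cons, List.foldl_append, List.foldl_cons, hstep,
      runFold xs r (fun op h => hrk (r, x :: xs) (by simp) op (by simp [h])) acc [x]]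
    simp only [List.singleton_append]
    rw [ih (fun q hq => hne q (by simp [hq])) (fun q hq => hrk q (by simp [hq]))
      (acc ++ [x :: xs]) (some r)
      (by rw [List.map_cons] at hch; exact (List.isChain_cons_cons.mp hch).2)]
    cases bs with
    | nil => simp
    | cons b bs =>
      rcases hlast : (some b.1 :: List.map (fun p => some p.1) bs).getLast? with _ | v
      · simp at hlast
      · simp [hlast]

theorem main_eq (operators : List String) :
    guess_precedence_order_py operators = guess_precedence_order_py_alt operators := by
  have hA : guess_precedence_order_py operators =
      (let st := canonicalA.foldl stepA ([], PySem.Set.ofList operators)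
       if st.2 ≠ [] then st.1 ++ [PySem.List.sorted st.2 (fun x => x) false] else st.1) := rfl
  rw [hA, foldA_char canonicalA [] (PySem.Set.ofList operators) (by decide)]
  set S := PySem.Set.ofList operators with hS
  have hcop : ∀ op : String, PySem.Set.contains S op = decide (op ∈ operators) := by
    intro op
    rw [Bool.eq_iff_iff, hS]
    simp [PySem.Set.mem_ofList]
  have hkeysO : orderB.keys = flatCanon := by decide
  have hcont : ∀ op : String, orderB.contains op = decide (op ∈ flatCanon) := by
    intro op
    rw [PySem.Dict.contains_eq_decide_mem_keys, hkeysO]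
  -- the filtered canonical groups, tagged with their ranks
  set F : List String → List String := fun g => g.filter (fun op => PySem.Set.contains S op) with hF
  set pairs : List (Int × List String) :=
    [(0, F ["||"]), (1, F ["&&"]), (2, F ["==", "!="]), (3, F ["<", ">", "<=", ">="]),
     (4, F ["+", "-"]), (5, F ["*", "/", "%"]), (6, F ["^"])] with hpairs
  set blocks := pairs.filter (fun p => p.2 ≠ []) with hblocks
  -- B's sorted known list is the flattened blocks
  have hknown : PySem.List.sorted (S.filter (fun op => orderB.contains op))
      (fun op => orderB.getD op 0) false = flatCanon.filter (fun op => PySem.Set.contains S op) := by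
    apply PySem.List.sorted_eq_of_perm_of_pairwise_lt
    · rw [List.perm_ext_iff_of_nodup
        (List.Nodup.filter _ (show flatCanon.Nodup by decide))
        (List.Nodup.filter _ (by rw [hS]; exact PySem.Set.nodup_ofList operators))]
      intro a
      simp [List.mem_filter, hcont, hS, PySem.Set.mem_ofList, and_comm]
    · exact List.Pairwise.filter _ (by decide)
  have hflat : flatCanon.filter (fun op => PySem.Set.contains S op) = (blocks.map (·.2)).flatten := by
    rw [hblocks, mapSnd_filter, List.flatten_filter_ne_nil, hpairs]
    simp only [List.map_cons, List.map_nil, List.flatten_cons, List.flatten_nil, List.append_nil, hF]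
    simp only [← List.filter_append]
    congr 1
  have hne' : ∀ p ∈ blocks, p.2 ≠ [] := fun p hp => by simpa using (List.mem_filter.mp hp).2
  have hrk' : ∀ p ∈ blocks, ∀ op ∈ p.2, rankB.getD op 0 = p.1 := by
    intro p hp op hop
    have hp' := List.mem_of_mem_filter hp
    rw [hpairs] at hp'
    simp only [List.mem_cons, List.not_mem_nil, or_false] at hp'
    rcases hp' with rfl|rfl|rfl|rfl|rfl|rfl|rfl <;>
    · simp only [hF] at hop
      have hmem := List.mem_of_mem_filter hop
      fin_cases hmem <;> rfl
  have hmapfst : pairs.map (fun p => some p.1) = [some 0, some 1, some 2, some 3, some 4, some 5, some 6] := by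
    rw [hpairs]; rfl
  have hch : ((none : Option Int) :: blocks.map (fun p => some p.1)).IsChain (· ≠ ·) := by
    have hsub : (none :: blocks.map (fun p => some p.1)).Sublist
        ((none : Option Int) :: pairs.map (fun p => some p.1)) :=
      List.Sublist.cons₂ _ (List.Sublist.map _ (by rw [hblocks]; exact List.filter_sublist))
    have hpw : ((none : Option Int) :: pairs.map (fun p => some p.1)).Pairwise (· ≠ ·) := by
      rw [hmapfst]; decide
    exact List.Pairwise.isChain (hpw.sublist hsub)
  have hfold := blocksFold blocks hne' hrk' [] none hch
  have hgroups : blocks.map (·.2) = (canonicalA.map (fun g => g.filter (fun op => PySem.Set.contains S op))).filter (fun l => l ≠ []) := by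
    rw [hblocks, mapSnd_filter, hpairs]; rfl
  have hleft : S.filter (fun op => !orderB.contains op) = S.filter (fun x => !(canonicalA.flatten.contains x)) := by
    apply List.filter_congr
    intro x _
    rw [hcont, Bool.eq_iff_iff]
    simp [canonicalA, flatCanon]
  have hB : guess_precedence_order_py_alt operators =
      (if PySem.List.sorted (S.filter (fun op => !orderB.contains op)) (fun x => x) false ≠ []
       then ((PySem.List.sorted (S.filter (fun op => orderB.contains op)) (fun op => orderB.getD op 0) false).foldl groupStepB ([], none)).1
            ++ [PySem.List.sorted (S.filter (fun op => !orderB.contains op)) (fun x => x) false]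
       else ((PySem.List.sorted (S.filter (fun op => orderB.contains op)) (fun op => orderB.getD op 0) false).foldl groupStepB ([], none)).1) := rfl
  rw [hB, hknown, hflat, hfold, hleft, hgroups]
  simp only [ne_eq, PySem.List.sorted_eq_nil_iff, List.nil_append]
  rfl

-- ===== VERDICT (by name: the statement is the Claim_ definition above) =====
theorem guess_precedence_order_py_spec : Claim_equal_guess_precedence_order_py := by
  intro operators _
  unfold Spec_guess_precedence_order_py
  exact main_eq operators
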